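-- pv_equiv track=rewrite | github.com/Commit2Cosmos/MetaHackerCupSolutions | 2022/Round_1/B2_WateringWells.py | solve
-- ===== SOURCE A (Python) =====
-- def solve(trees_X, trees_Y, wells_X, wells_Y, N, Q) -> bool:
--     MOD = 1000000007
--
--     tree_x = tree_y = tree_x_sq = tree_y_sq = 0
--
--     for n in range(N):
--         tree_x = (tree_x + trees_X[n]) % MOD
--         tree_x_sq = (tree_x_sq + trees_X[n]**2) % MOD
--
--         tree_y = (tree_y + trees_Y[n]) % MOD
--         tree_y_sq = (tree_y_sq + trees_Y[n]**2) % MOD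
--
--     res = 0
--
--     for q in range(Q):
--         res = (res + N*wells_X[q]**2 - 2*tree_x*wells_X[q] + tree_x_sq) % MOD
--         res = (res + N*wells_Y[q]**2 - 2*tree_y*wells_Y[q] + tree_y_sq) % MOD
--
--     return res
-- ===== SOURCE B (Python) =====
-- def solve(trees_X, trees_Y, wells_X, wells_Y, N, Q) -> bool:
--     MOD = 1000000007
--
--     res = 0
--
--     for q in range(Q):
--         for n in range(N):
--             res = (res + (wells_X[q] - trees_X[n])**2
--                        + (wells_Y[q] - trees_Y[n])**2) % MOD
--
--     return res
-- ===== Notes on version B (the rewrite author's own statement) =====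
-- stated objective: simpler
-- what changed: Replaced the prefix-sum accumulation plus closed-form per-well expansion by the direct nested loop that adds each squared well-to-tree distance mod p.
-- outside the precondition, e.g. on solve([], [], [1], [1], -1, 1): A returns 1000000005, B returns 0
import Mathlib
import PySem

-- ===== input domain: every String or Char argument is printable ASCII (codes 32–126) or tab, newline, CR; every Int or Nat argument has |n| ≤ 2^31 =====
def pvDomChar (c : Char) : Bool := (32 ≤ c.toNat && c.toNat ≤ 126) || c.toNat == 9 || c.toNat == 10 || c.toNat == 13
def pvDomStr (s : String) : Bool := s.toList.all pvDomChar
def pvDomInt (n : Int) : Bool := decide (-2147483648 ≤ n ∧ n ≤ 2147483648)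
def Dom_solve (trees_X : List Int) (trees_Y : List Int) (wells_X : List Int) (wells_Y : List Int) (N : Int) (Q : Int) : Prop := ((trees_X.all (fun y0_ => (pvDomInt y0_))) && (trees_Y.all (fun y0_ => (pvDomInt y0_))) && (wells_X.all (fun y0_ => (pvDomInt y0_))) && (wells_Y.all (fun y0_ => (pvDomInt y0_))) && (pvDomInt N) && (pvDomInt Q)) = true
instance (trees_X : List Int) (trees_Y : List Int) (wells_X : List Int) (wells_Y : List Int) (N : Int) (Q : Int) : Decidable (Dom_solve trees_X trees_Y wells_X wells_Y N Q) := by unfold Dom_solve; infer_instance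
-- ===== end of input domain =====

-- B drops A's prefix-sum accumulation and closed-form per-well expansion for the direct
-- nested sum of squared distances mod p (simpler; not faster).

-- ===== PORT A =====
def solve (trees_X : List Int) (trees_Y : List Int) (wells_X : List Int) (wells_Y : List Int) (N : Int) (Q : Int) : Int :=
  let M : Int := 1000000007
  let t : Int × Int × Int × Int :=
    (PySem.List.pyRange 0 N 1).foldl
      (fun acc n =>
        (PySem.Int.mod (acc.1 + PySem.List.pyGetD trees_X n 0) M,
         PySem.Int.mod (acc.2.1 + (PySem.List.pyGetD trees_X n 0) ^ 2) M,
         PySem.Int.mod (acc.2.2.1 + PySem.List.pyGetD trees_Y n 0) M,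
         PySem.Int.mod (acc.2.2.2 + (PySem.List.pyGetD trees_Y n 0) ^ 2) M))
      (0, 0, 0, 0)
  (PySem.List.pyRange 0 Q 1).foldl
    (fun res q =>
      let res1 := PySem.Int.mod (res + N * (PySem.List.pyGetD wells_X q 0) ^ 2
                    - 2 * t.1 * (PySem.List.pyGetD wells_X q 0) + t.2.1) M
      PySem.Int.mod (res1 + N * (PySem.List.pyGetD wells_Y q 0) ^ 2
                    - 2 * t.2.2.1 * (PySem.List.pyGetD wells_Y q 0) + t.2.2.2) M)
    0

-- ===== PORT B =====
def solve_alt (trees_X : List Int) (trees_Y : List Int) (wells_X : List Int) (wells_Y : List Int) (N : Int) (Q : Int) : Int :=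
  let M : Int := 1000000007
  (PySem.List.pyRange 0 Q 1).foldl
    (fun res q =>
      (PySem.List.pyRange 0 N 1).foldl
        (fun res n =>
          PySem.Int.mod (res + (PySem.List.pyGetD wells_X q 0 - PySem.List.pyGetD trees_X n 0) ^ 2
                             + (PySem.List.pyGetD wells_Y q 0 - PySem.List.pyGetD trees_Y n 0) ^ 2) M)
        res)
    0

-- ===== PRECONDITION & SPEC =====
-- Pre_ excludes N or Q exceeding the corresponding list lengths (A and B both raise
-- IndexError there) and negative N with a positive Q, a negative count outside the
-- task's natural domain, on which A's closed-form query returns a meaningless leftover value.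
def Pre_solve (trees_X : List Int) (trees_Y : List Int) (wells_X : List Int) (wells_Y : List Int) (N : Int) (Q : Int) : Prop :=
  (0 ≤ N ∨ Q ≤ 0) ∧ N ≤ (trees_X.length : Int) ∧ N ≤ (trees_Y.length : Int) ∧
  Q ≤ (wells_X.length : Int) ∧ Q ≤ (wells_Y.length : Int)
instance (trees_X : List Int) (trees_Y : List Int) (wells_X : List Int) (wells_Y : List Int) (N : Int) (Q : Int) : Decidable (Pre_solve trees_X trees_Y wells_X wells_Y N Q) := by unfold Pre_solve; infer_instance

def pvWitness_solve : List Int × List Int × List Int × List Int × Int × Int := ([1, 2], [3, 4], [5], [6], 2, 1)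

def Spec_solve (trees_X : List Int) (trees_Y : List Int) (wells_X : List Int) (wells_Y : List Int) (N : Int) (Q : Int) (out : Int) : Prop := out = solve_alt trees_X trees_Y wells_X wells_Y N Q
instance (trees_X : List Int) (trees_Y : List Int) (wells_X : List Int) (wells_Y : List Int) (N : Int) (Q : Int) (out : Int) : Decidable (Spec_solve trees_X trees_Y wells_X wells_Y N Q out) := by unfold Spec_solve; infer_instance

-- ===== CLAIM (what is proved, stated in full; the proofs are below) =====
def Claim_equal_solve : Prop := ∀ (trees_X : List Int) (trees_Y : List Int) (wells_X : List Int) (wells_Y : List Int) (N : Int) (Q : Int), Dom_solve trees_X trees_Y wells_X wells_Y N Q → Pre_solve trees_X trees_Y wells_X wells_Y N Q → Spec_solve trees_X trees_Y wells_X wells_Y N Q (solve trees_X trees_Y wells_X wells_Y N Q)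

-- ===== LEMMAS AND PROOFS =====

-- A fold whose every step is 'reduce (r + F a) mod M' computes the reduced total sum.
theorem pv_foldl_mod_sum {α : Type} (M : Int) (_hM : 0 < M) (step : Int → α → Int) (F : α → Int)
    (hstep : ∀ r a, r % M = r → step r a = (r + F a) % M) :
    ∀ (l : List α) (r0 : Int), r0 % M = r0 →
      l.foldl step r0 = (r0 + (l.map F).sum) % M := by
  intro l
  induction l with
  | nil => intro r0 h0; simpa using h0.symm
  | cons a l ih =>
    intro r0 h0
    have h1 : (r0 + F a) % M % M = (r0 + F a) % M := Int.emod_emod_of_dvd _ dvd_rfl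
    simp only [List.foldl_cons, hstep r0 a h0, ih _ h1, List.map_cons, List.sum_cons]
    rw [Int.emod_add_emod, add_assoc]

-- Sums of pointwise-congruent terms are congruent mod M.
theorem pv_sum_modeq {α : Type} (M : Int) (f g : α → Int) :
    ∀ (l : List α), (∀ a ∈ l, f a % M = g a % M) →
      (l.map f).sum % M = (l.map g).sum % M := by
  intro l
  induction l with
  | nil => intro _; rfl
  | cons a l ih =>
    intro h
    have hfg : Int.ModEq M (f a) (g a) := h a (List.mem_cons_self)
    have hl : Int.ModEq M (l.map f).sum (l.map g).sum := ih (fun b hb => h b (List.mem_cons_of_mem _ hb))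
    simpa using (hfg.add hl)

-- Closed form of the per-well inner sum of squared distances.
theorem pv_inner_sum (l : List Int) (t : Int → Int) (w : Int) :
    (l.map (fun n => (w - t n) ^ 2)).sum
      = (l.length : Int) * w ^ 2 - 2 * (l.map t).sum * w + (l.map (fun n => (t n) ^ 2)).sum := by
  induction l with
  | nil => simp
  | cons a l ih =>
    simp only [List.map_cons, List.sum_cons, List.length_cons, ih]
    push_cast
    ring

-- The 4-tuple tree accumulator splits into four independent Int folds.
theorem pv_tree_acc_split (M : Int) (txs tys : List Int) :
    ∀ (l : List Int) (a b c d : Int),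
      l.foldl (fun acc n =>
        (PySem.Int.mod (acc.1 + PySem.List.pyGetD txs n 0) M,
         PySem.Int.mod (acc.2.1 + (PySem.List.pyGetD txs n 0) ^ 2) M,
         PySem.Int.mod (acc.2.2.1 + PySem.List.pyGetD tys n 0) M,
         PySem.Int.mod (acc.2.2.2 + (PySem.List.pyGetD tys n 0) ^ 2) M)) (a, b, c, d)
      = (l.foldl (fun r n => PySem.Int.mod (r + PySem.List.pyGetD txs n 0) M) a,
         l.foldl (fun r n => PySem.Int.mod (r + (PySem.List.pyGetD txs n 0) ^ 2) M) b,
         l.foldl (fun r n => PySem.Int.mod (r + PySem.List.pyGetD tys n 0) M) c,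
         l.foldl (fun r n => PySem.Int.mod (r + (PySem.List.pyGetD tys n 0) ^ 2) M) d) := by
  intro l
  induction l with
  | nil => intro a b c d; rfl
  | cons x l ih => intro a b c d; simp only [List.foldl_cons]; exact ih _ _ _ _

theorem pvA_outer (wells_X wells_Y : List Int) (N tx tx2 ty ty2 : Int) (l : List Int) :
    l.foldl (fun res q =>
        PySem.Int.mod
          (PySem.Int.mod (res + N * (PySem.List.pyGetD wells_X q 0) ^ 2
              - 2 * tx * (PySem.List.pyGetD wells_X q 0) + tx2) 1000000007
            + N * (PySem.List.pyGetD wells_Y q 0) ^ 2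
            - 2 * ty * (PySem.List.pyGetD wells_Y q 0) + ty2) 1000000007) 0
      = (l.map (fun q =>
          (N * (PySem.List.pyGetD wells_X q 0) ^ 2 - 2 * tx * (PySem.List.pyGetD wells_X q 0) + tx2)
          + (N * (PySem.List.pyGetD wells_Y q 0) ^ 2 - 2 * ty * (PySem.List.pyGetD wells_Y q 0) + ty2))).sum
        % 1000000007 := by
  have h := pv_foldl_mod_sum (1000000007 : Int) (by norm_num)
    (fun res q =>
        PySem.Int.mod
          (PySem.Int.mod (res + N * (PySem.List.pyGetD wells_X q 0) ^ 2
              - 2 * tx * (PySem.List.pyGetD wells_X q 0) + tx2) 1000000007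
            + N * (PySem.List.pyGetD wells_Y q 0) ^ 2
            - 2 * ty * (PySem.List.pyGetD wells_Y q 0) + ty2) 1000000007)
    (fun q =>
          (N * (PySem.List.pyGetD wells_X q 0) ^ 2 - 2 * tx * (PySem.List.pyGetD wells_X q 0) + tx2)
          + (N * (PySem.List.pyGetD wells_Y q 0) ^ 2 - 2 * ty * (PySem.List.pyGetD wells_Y q 0) + ty2))
    (by
      intro r q _
      beta_reduce
      rw [PySem.Int.mod_eq_emod_of_pos (by norm_num), PySem.Int.mod_eq_emod_of_pos (by norm_num)]
      have h0 : Int.ModEq 1000000007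
          ((r + N * (PySem.List.pyGetD wells_X q 0) ^ 2
              - 2 * tx * (PySem.List.pyGetD wells_X q 0) + tx2) % 1000000007)
          (r + N * (PySem.List.pyGetD wells_X q 0) ^ 2
              - 2 * tx * (PySem.List.pyGetD wells_X q 0) + tx2) :=
        Int.emod_emod_of_dvd _ dvd_rfl
      refine Eq.trans (Int.ModEq.add_right ty2 (Int.ModEq.sub_right _ (Int.ModEq.add_right _ h0))) ?_
      congr 1
      ring)
    l 0 (by norm_num)
  simpa using h

theorem solve_eq_sum (trees_X trees_Y wells_X wells_Y : List Int) (N Q : Int) (hN : 0 ≤ N) :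
    solve trees_X trees_Y wells_X wells_Y N Q
      = ((PySem.List.pyRange 0 Q 1).map (fun q =>
          ((PySem.List.pyRange 0 N 1).map (fun n =>
            (PySem.List.pyGetD wells_X q 0 - PySem.List.pyGetD trees_X n 0) ^ 2
            + (PySem.List.pyGetD wells_Y q 0 - PySem.List.pyGetD trees_Y n 0) ^ 2)).sum)).sum
        % 1000000007 := by
  have hM : (0 : Int) < 1000000007 := by norm_num
  have hmod : ∀ a : Int, PySem.Int.mod a (1000000007 : Int) = a % 1000000007 :=
    fun a => PySem.Int.mod_eq_emod_of_pos hM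
  have hacc : ∀ (xs : List Int) (f : Int → Int),
      (PySem.List.pyRange 0 N 1).foldl (fun r n => PySem.Int.mod (r + f n) (1000000007 : Int)) 0
        = ((PySem.List.pyRange 0 N 1).map f).sum % 1000000007 := by
    intro xs f
    have := pv_foldl_mod_sum (1000000007 : Int) hM _ f
      (fun r a _ => hmod _) (PySem.List.pyRange 0 N 1) 0 (by norm_num)
    simpa using this
  simp only [solve]
  rw [pv_tree_acc_split, hacc trees_X, hacc trees_X, hacc trees_Y, hacc trees_Y, pvA_outer]
  -- replace the reduced tree accumulators by the true sums, then expand the closed form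
  apply pv_sum_modeq
  intro q _
  have hcong : ∀ (S S2 w : Int),
      (N * w ^ 2 - 2 * (S % 1000000007) * w + S2 % 1000000007) % 1000000007
        = (N * w ^ 2 - 2 * S * w + S2) % 1000000007 := by
    intro S S2 w
    have hS : Int.ModEq 1000000007 (S % 1000000007) S := Int.emod_emod_of_dvd _ dvd_rfl
    have hS2 : Int.ModEq 1000000007 (S2 % 1000000007) S2 := Int.emod_emod_of_dvd _ dvd_rfl
    exact ((Int.ModEq.refl _).sub (((Int.ModEq.refl (2:Int)).mul hS).mul (Int.ModEq.refl _))).add hS2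
  have hsum : ∀ a b a' b' : Int,
      a % 1000000007 = a' % 1000000007 → b % 1000000007 = b' % 1000000007 →
      (a + b) % 1000000007 = (a' + b') % 1000000007 :=
    fun a b a' b' h1 h2 => Int.ModEq.add h1 h2
  rw [hsum _ _ _ _ (hcong _ _ _) (hcong _ _ _)]
  congr 1
  have hlen : ((PySem.List.pyRange 0 N 1).length : Int) = N := by
    rw [PySem.List.length_pyRange_one]; omega
  rw [PySem.List.sum_map_add_int, pv_inner_sum, pv_inner_sum, hlen]

theorem pvB_inner (trees_X trees_Y : List Int) (wx wy : Int) (l : List Int) (r : Int)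
    (hr : r % 1000000007 = r) :
    l.foldl (fun res n =>
        PySem.Int.mod (res + (wx - PySem.List.pyGetD trees_X n 0) ^ 2
          + (wy - PySem.List.pyGetD trees_Y n 0) ^ 2) 1000000007) r
      = (r + (l.map (fun n => (wx - PySem.List.pyGetD trees_X n 0) ^ 2
          + (wy - PySem.List.pyGetD trees_Y n 0) ^ 2)).sum) % 1000000007 := by
  refine pv_foldl_mod_sum 1000000007 (by norm_num) _ _ ?_ l r hr
  intro r' n _
  beta_reduce
  rw [PySem.Int.mod_eq_emod_of_pos (by norm_num), add_assoc]

theorem solve_alt_eq_sum (trees_X trees_Y wells_X wells_Y : List Int) (N Q : Int) :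
    solve_alt trees_X trees_Y wells_X wells_Y N Q
      = ((PySem.List.pyRange 0 Q 1).map (fun q =>
          ((PySem.List.pyRange 0 N 1).map (fun n =>
            (PySem.List.pyGetD wells_X q 0 - PySem.List.pyGetD trees_X n 0) ^ 2
            + (PySem.List.pyGetD wells_Y q 0 - PySem.List.pyGetD trees_Y n 0) ^ 2)).sum)).sum
        % 1000000007 := by
  simp only [solve_alt]
  have h := pv_foldl_mod_sum (1000000007 : Int) (by norm_num)
    (fun res q =>
      (PySem.List.pyRange 0 N 1).foldl (fun res n =>
        PySem.Int.mod (res + (PySem.List.pyGetD wells_X q 0 - PySem.List.pyGetD trees_X n 0) ^ 2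
          + (PySem.List.pyGetD wells_Y q 0 - PySem.List.pyGetD trees_Y n 0) ^ 2) 1000000007) res)
    (fun q => ((PySem.List.pyRange 0 N 1).map (fun n =>
        (PySem.List.pyGetD wells_X q 0 - PySem.List.pyGetD trees_X n 0) ^ 2
        + (PySem.List.pyGetD wells_Y q 0 - PySem.List.pyGetD trees_Y n 0) ^ 2)).sum)
    (fun r q hr => pvB_inner trees_X trees_Y
        (PySem.List.pyGetD wells_X q 0) (PySem.List.pyGetD wells_Y q 0)
        (PySem.List.pyRange 0 N 1) r hr)
    (PySem.List.pyRange 0 Q 1) 0 (by norm_num)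
  simpa using h

-- ===== VERDICT (by name: the statement is the Claim_ definition above) =====
theorem solve_spec : Claim_equal_solve := by
  intro trees_X trees_Y wells_X wells_Y N Q _hDom hPre
  unfold Spec_solve
  rcases hPre.1 with hN | hQ
  · rw [solve_eq_sum trees_X trees_Y wells_X wells_Y N Q hN, solve_alt_eq_sum]
  · -- Q ≤ 0: both loops over wells are empty, both programs return 0
    simp [solve, solve_alt, PySem.List.pyRange_one_eq_nil (by omega : Q ≤ 0)]
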